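-- pv_equiv track=rewrite | github.com/gregarendse/adventofcode | 2020/18/main.py | find_opening_bracket
-- ===== SOURCE A (Python) =====
-- def find_opening_bracket(end, line) -> int:
--     start: int = line.find('(', 0, end)
--     open_bracket: int = start
--     while start != -1:
--         start = line.find('(', start + 1, end)
--         if start != -1:
--             open_bracket = start
--     return open_bracket
-- ===== SOURCE B (Python) =====
-- def find_opening_bracket(end, line) -> int:
--     n = len(line)
--     e = end + n if end < 0 else end
--     e = max(0, min(e, n))
--     for i in range(e - 1, -1, -1):
--         if line[i] == '(':
--             return i
--     return -1
-- ===== Notes on version B (the rewrite author's own statement) =====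
-- stated objective: alternative
-- what changed: B replaces A's repeated forward str.find sweeps (each restarting after the previous hit) with a single backward scan from the effective end that returns at the first '(' found.
import Mathlib
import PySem

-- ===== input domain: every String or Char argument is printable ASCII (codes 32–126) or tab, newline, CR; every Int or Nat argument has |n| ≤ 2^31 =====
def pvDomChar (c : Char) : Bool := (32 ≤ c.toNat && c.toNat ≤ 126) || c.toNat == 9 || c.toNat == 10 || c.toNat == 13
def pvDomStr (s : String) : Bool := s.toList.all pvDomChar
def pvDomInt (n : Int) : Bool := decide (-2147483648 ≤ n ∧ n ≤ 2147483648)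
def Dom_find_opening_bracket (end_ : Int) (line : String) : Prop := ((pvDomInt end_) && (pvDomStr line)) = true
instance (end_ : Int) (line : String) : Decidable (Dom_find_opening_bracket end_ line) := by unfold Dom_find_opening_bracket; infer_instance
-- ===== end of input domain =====

-- B is an alternative decomposition: a single backward scan with early exit instead of A's
-- repeated forward str.find sweeps; return values proved identical on all inputs.

-- ===== PORT A =====
-- the while loop, with fuel (the loop runs at most len(line)+1 times: each non-(-1)
-- `start` strictly increases and is bounded by the string length)
def faLoop (line : String) (end_ : Int) : Nat → Int → Int → Int
  | 0, _, ob => ob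
  | fuel+1, start, ob =>
    if start = -1 then ob
    else
      let s := PySem.Str.findFrom line "(" (start+1) (some end_)
      faLoop line end_ fuel s (if s ≠ -1 then s else ob)

def find_opening_bracket (end_ : Int) (line : String) : Int :=
  let start : Int := PySem.Str.findFrom line "(" 0 (some end_)
  faLoop line end_ (line.toList.length + 1) start start

-- ===== PORT B =====
-- `for i in range(e-1, -1, -1): if line[i] == '(': return i` ; `return -1`.
-- the index i is always in range (i < e ≤ len(line)), so getD is exact here.
def scanBack (cs : List Char) : Nat → Int
  | 0 => -1
  | i+1 => if cs.getD i ' ' = '(' then (i : Int) else scanBack cs i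

def find_opening_bracket_alt (end_ : Int) (line : String) : Int :=
  let cs := line.toList
  let n : Int := cs.length
  let e0 : Int := if end_ < 0 then end_ + n else end_
  let e : Int := max 0 (min e0 n)
  scanBack cs e.toNat

-- ===== PRECONDITION & SPEC =====
def Spec_find_opening_bracket (end_ : Int) (line : String) (out : Int) : Prop := out = find_opening_bracket_alt end_ line
instance (end_ : Int) (line : String) (out : Int) : Decidable (Spec_find_opening_bracket end_ line out) := by unfold Spec_find_opening_bracket; infer_instance

-- ===== CLAIM (what is proved, stated in full; the proofs are below) =====
def Claim_equal_find_opening_bracket : Prop := ∀ (end_ : Int) (line : String), Dom_find_opening_bracket end_ line → Spec_find_opening_bracket end_ line (find_opening_bracket end_ line)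

-- ===== LEMMAS AND PROOFS =====

-- the effective end index both programs work with
def effNat (n : Nat) (end_ : Int) : Nat :=
  (max 0 (min (if end_ < 0 then end_ + (n : Int) else end_) (n : Int))).toNat

theorem effNat_le (n : Nat) (end_ : Int) : effNat n end_ ≤ n := by
  unfold effNat; omega

theorem alt_eq_scanBack (end_ : Int) (line : String) :
    find_opening_bracket_alt end_ line = scanBack line.toList (effNat line.toList.length end_) := by
  simp [find_opening_bracket_alt, effNat]

theorem singleton_prefix {l : List Char} {a : Char} : [a] <+: l ↔ l.head? = some a := by
  cases l with
  | nil => simp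
  | cons b t =>
    constructor
    · rintro ⟨u, hu⟩
      simp at hu
      simp [hu.1]
    · intro h
      simp at h
      exact ⟨t, by simp [h]⟩

theorem singleton_prefix_drop {l : List Char} {a : Char} {j : Nat} :
    ([a] <+: l.drop j) ↔ l[j]? = some a := by
  rw [singleton_prefix, List.head?_drop]

-- findFrom with an explicit end bound equals findFrom on the truncated string
theorem ff_take (cs : List Char) (end_ : Int) (k : Nat) :
    PySem.Chars.findFrom cs ['('] (k : Int) (some end_) =
      PySem.Chars.findFrom (cs.take (effNat cs.length end_)) ['('] (k : Int) none := by
  have hk0 : ¬((k : Int) < 0) := by omega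
  have hE : (if (cs.length : Int) < end_ then (cs.length : Int)
      else if end_ < 0 then (if end_ + (cs.length : Int) < 0 then 0 else end_ + (cs.length : Int))
      else end_) = ((effNat cs.length end_ : Nat) : Int) := by
    unfold effNat; split_ifs <;> omega
  have hlen : (List.take (effNat cs.length end_) cs).length = effNat cs.length end_ := by
    simp only [List.length_take]; unfold effNat; split_ifs <;> omega
  simp only [PySem.Chars.findFrom, hlen, hE]
  simp only [if_neg hk0]
  simp [List.take_take]

-- no occurrence characterization
theorem ff_none_iff (cs' : List Char) (k : Nat) (hk : k ≤ cs'.length) :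
    PySem.Chars.findFrom cs' ['('] (k : Int) none = -1 ↔
      ∀ i, k ≤ i → cs'[i]? ≠ some '(' := by
  rw [PySem.Chars.findFrom_natCast_eq_neg_one_iff cs' ['('] k hk]
  rw [← PySem.Chars.isIn_eq_false_iff]
  constructor
  · intro h i hi hsome
    have : PySem.Chars.isIn ['('] (cs'.drop k) = true := by
      rw [← PySem.Chars.exists_prefix_drop_iff_isIn]
      refine ⟨i - k, ?_⟩
      rw [List.drop_drop, singleton_prefix_drop]
      have hki : k + (i - k) = i := by omega
      rw [hki]; exact hsome
    simp [this] at h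
  · intro h
    rw [PySem.Chars.isIn_eq_false_iff]
    intro hinf
    have hb : PySem.Chars.isIn ['('] (List.drop k cs') = true :=
      (PySem.Chars.isIn_iff_infix _ _).mpr hinf
    rw [← PySem.Chars.exists_prefix_drop_iff_isIn] at hb
    rcases hb with ⟨j, hj⟩
    rw [List.drop_drop, singleton_prefix_drop] at hj
    exact h (k + j) (by omega) hj

theorem ff_pos (cs' : List Char) (k : Nat) (hk : k ≤ cs'.length)
    (h : PySem.Chars.findFrom cs' ['('] (k : Int) none ≠ -1) :
    ∃ m : Nat, PySem.Chars.findFrom cs' ['('] (k : Int) none = (m : Int) ∧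
      k ≤ m ∧ m < cs'.length ∧ cs'[m]? = some '(' ∧
      ∀ i, k ≤ i → i < m → cs'[i]? ≠ some '(' := by
  obtain ⟨h1, h2, h3⟩ := PySem.Chars.findFrom_natCast_spec cs' ['('] k hk h
  refine ⟨(PySem.Chars.findFrom cs' ['('] (k : Int) none).toNat, by omega, by omega, ?_, ?_, ?_⟩
  · have hlt : (PySem.Chars.findFrom cs' ['('] (k : Int) none).toNat < cs'.length := by
      rcases List.getElem?_eq_some_iff.mp (singleton_prefix_drop.mp h2) with ⟨hl, _⟩
      exact hl
    exact hlt
  · exact singleton_prefix_drop.mp h2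
  · intro i hki him hsome
    exact h3 i hki him (singleton_prefix_drop.mpr hsome)

theorem faLoop_neg (line : String) (end_ : Int) (fuel : Nat) (ob : Int) :
    faLoop line end_ fuel (-1) ob = ob := by
  cases fuel <;> simp [faLoop]

theorem scan_none (cs : List Char) (e : Nat) (he : e ≤ cs.length)
    (h : ∀ i, i < e → cs[i]? ≠ some '(') : scanBack cs e = -1 := by
  induction e with
  | zero => rfl
  | succ e ih =>
    have hlt : e < cs.length := by omega
    have hne : cs.getD e ' ' ≠ '(' := by
      intro hc
      exact h e (by omega) (by rw [List.getD_eq_getElem?_getD] at hc; simp [List.getElem?_eq_getElem hlt] at hc ⊢; exact hc)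
    simp only [scanBack]
    rw [if_neg hne]
    exact ih (by omega) (fun i hi => h i (by omega))

theorem scan_last (cs : List Char) (e m : Nat) (he : e ≤ cs.length) (hm : m < e)
    (hQ : cs[m]? = some '(') (hafter : ∀ i, m < i → i < e → cs[i]? ≠ some '(') :
    scanBack cs e = (m : Int) := by
  induction e with
  | zero => omega
  | succ e ih =>
    by_cases hme : m = e
    · subst hme
      have hpos : cs.getD m ' ' = '(' := by
        rw [List.getD_eq_getElem?_getD, hQ]; rfl
      simp only [scanBack]
      rw [if_pos hpos]
    · have hlt : e < cs.length := by omega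
      have hne : cs.getD e ' ' ≠ '(' := by
        intro hc
        exact hafter e (by omega) (by omega) (by rw [List.getD_eq_getElem?_getD] at hc; simp [List.getElem?_eq_getElem hlt] at hc ⊢; exact hc)
      simp only [scanBack]
      rw [if_neg hne]
      exact ih (by omega) (by omega) (fun i hi hie => hafter i hi (by omega))

theorem loop_main (line : String) (end_ : Int) :
    ∀ (fuel m : Nat), m < effNat line.toList.length end_ →
      effNat line.toList.length end_ ≤ m + fuel →
      line.toList[m]? = some '(' →
      faLoop line end_ fuel (m : Int) (m : Int) = scanBack line.toList (effNat line.toList.length end_) := by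
  intro fuel
  induction fuel with
  | zero => intro m hm hfu _; omega
  | succ fuel ih =>
    intro m hm hfu hQ
    have hEl : effNat line.toList.length end_ ≤ line.toList.length := effNat_le _ _
    have hlen' : (line.toList.take (effNat line.toList.length end_)).length
        = effNat line.toList.length end_ := by
      simp only [List.length_take]; omega
    have hcast : (m : Int) + 1 = ((m + 1 : Nat) : Int) := by push_cast; ring
    have hs : PySem.Str.findFrom line "(" ((m : Int) + 1) (some end_)
        = PySem.Chars.findFrom (line.toList.take (effNat line.toList.length end_)) ['(']
            ((m + 1 : Nat) : Int) none := by
      rw [PySem.Str.findFrom_eq, show "(".toList = ['('] from rfl, hcast,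
        ff_take line.toList end_ (m + 1)]
    simp only [faLoop]
    rw [if_neg (show ¬((m : Int) = -1) by omega), hs]
    by_cases hneg : PySem.Chars.findFrom (line.toList.take (effNat line.toList.length end_)) ['(']
        ((m + 1 : Nat) : Int) none = -1
    · rw [hneg, if_neg (by simp), faLoop_neg]
      have hafter : ∀ i, m < i → i < effNat line.toList.length end_ →
          line.toList[i]? ≠ some '(' := by
        intro i h1 h2 hc
        have := (ff_none_iff _ (m + 1) (by omega)).mp hneg i (by omega)
        rw [List.getElem?_take, if_pos h2] at this
        exact this hc
      exact (scan_last line.toList _ m hEl hm hQ hafter).symm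
    · obtain ⟨m', hm'eq, hge, hlt, hQ', -⟩ := ff_pos _ (m + 1) (by omega) hneg
      rw [hm'eq, if_pos (by omega)]
      have hQcs : line.toList[m']? = some '(' := by
        rw [List.getElem?_take, if_pos (by omega)] at hQ'
        exact hQ'
      exact ih m' (by omega) (by omega) hQcs

theorem find_opening_bracket_spec : Claim_equal_find_opening_bracket := by
  intro end_ line _
  unfold Spec_find_opening_bracket
  rw [alt_eq_scanBack]
  have hEl : effNat line.toList.length end_ ≤ line.toList.length := effNat_le _ _
  have hlen' : (line.toList.take (effNat line.toList.length end_)).length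
      = effNat line.toList.length end_ := by
    simp only [List.length_take]; omega
  have hs0 : PySem.Str.findFrom line "(" 0 (some end_)
      = PySem.Chars.findFrom (line.toList.take (effNat line.toList.length end_)) ['(']
          ((0 : Nat) : Int) none := by
    rw [PySem.Str.findFrom_eq, show "(".toList = ['('] from rfl,
      show (0 : Int) = ((0 : Nat) : Int) from rfl, ff_take line.toList end_ 0]
  simp only [find_opening_bracket]
  rw [hs0]
  by_cases hneg : PySem.Chars.findFrom (line.toList.take (effNat line.toList.length end_)) ['(']
      ((0 : Nat) : Int) none = -1
  · rw [hneg, faLoop_neg]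
    have h0 : ∀ i, i < effNat line.toList.length end_ → line.toList[i]? ≠ some '(' := by
      intro i h2 hc
      have := (ff_none_iff _ 0 (by omega)).mp hneg i (by omega)
      rw [List.getElem?_take, if_pos h2] at this
      exact this hc
    exact (scan_none line.toList _ hEl h0).symm
  · obtain ⟨m0, hm0eq, -, hlt, hQ', -⟩ := ff_pos _ 0 (by omega) hneg
    have hQcs : line.toList[m0]? = some '(' := by
      rw [List.getElem?_take, if_pos (by omega)] at hQ'
      exact hQ'
    rw [hm0eq]
    exact loop_main line end_ (line.toList.length + 1) m0 (by omega) (by omega) hQcs
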